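-- pv_equiv track=rewrite | github.com/mariaabirizk/ensae-prog23-1 | delivery_network/graph.py | tri_des_camions
-- ===== SOURCE A (Python) =====
-- def tri_des_camions(lignes):
--     L_reverse=[]
--     max=lignes[-1][1]
--     for l in reversed(lignes):
--         valeur = l[1]
--         if valeur<=max :
--             max=valeur
--             L_reverse.append(l)
--     return list(reversed(L_reverse))
-- ===== SOURCE B (Python) =====
-- def tri_des_camions(lignes):
--     # Suffix-minimum pass then a forward filter (no reversal of the result).
--     sufs = []
--     m = None
--     for l in reversed(lignes):
--         sufs.append(m)
--         if m is None or l[1] < m: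
--             m = l[1]
--     sufs.reverse()
--     return [l for l, s in zip(lignes, sufs) if s is None or l[1] <= s]
-- ===== Notes on version B (the rewrite author's own statement) =====
-- stated objective: alternative
-- what changed: B records a suffix-minimum array in one backward pass and then filters the list forward with a zip comprehension, instead of A's backward filter with a running minimum followed by reversing the collected result.
import Mathlib
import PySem

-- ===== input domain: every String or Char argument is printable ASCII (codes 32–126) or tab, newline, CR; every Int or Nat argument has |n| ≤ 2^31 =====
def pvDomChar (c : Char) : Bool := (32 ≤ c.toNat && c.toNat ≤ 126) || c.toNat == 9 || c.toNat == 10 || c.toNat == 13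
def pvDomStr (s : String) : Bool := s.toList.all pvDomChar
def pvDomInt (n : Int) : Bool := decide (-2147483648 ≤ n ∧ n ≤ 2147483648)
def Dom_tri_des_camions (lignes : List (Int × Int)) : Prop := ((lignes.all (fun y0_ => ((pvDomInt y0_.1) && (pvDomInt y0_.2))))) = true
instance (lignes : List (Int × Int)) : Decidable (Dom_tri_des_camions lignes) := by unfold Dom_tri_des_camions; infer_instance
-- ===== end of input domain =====

-- B builds a suffix-minimum array and filters forward instead of A's backward
-- running-minimum filter plus final reversal (objective: alternative, same cost).

-- ===== PORT A =====
-- A: max = lignes[-1][1]; backward scan keeping l with l[1] <= running max; reverse at the end.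
def tri_des_camions (lignes : List (Int × Int)) : List (Int × Int) :=
  match PySem.List.pyGet? lignes (-1) with
  | none => []   -- Python raises IndexError here; excluded by Pre_
  | some last =>
    let st := lignes.reverse.foldl
      (fun (st : Int × List (Int × Int)) l =>
        if l.2 ≤ st.1 then (l.2, st.2 ++ [l]) else st)
      (last.2, ([] : List (Int × Int)))
    st.2.reverse

-- ===== PORT B =====
-- B: one backward pass appending the current suffix minimum (None initially),
-- reverse the sufs array, then a forward zip-filter comprehension.
def tri_des_camions_alt (lignes : List (Int × Int)) : List (Int × Int) :=
  let st := lignes.reverse.foldl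
    (fun (st : Option Int × List (Option Int)) l =>
      ((match st.1 with
        | none => some l.2
        | some v => if l.2 < v then some l.2 else st.1), st.2 ++ [st.1]))
    ((none : Option Int), ([] : List (Option Int)))
  let sufs := st.2.reverse
  ((lignes.zip sufs).filter
     (fun p => match p.2 with | none => true | some v => decide (p.1.2 ≤ v))).map Prod.fst

-- ===== PRECONDITION & SPEC =====
-- Pre_ excludes only the empty list, on which A raises IndexError at lignes[-1].
def Pre_tri_des_camions (lignes : List (Int × Int)) : Prop := lignes ≠ []
instance (lignes : List (Int × Int)) : Decidable (Pre_tri_des_camions lignes) := by unfold Pre_tri_des_camions; infer_instance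
def pvWitness_tri_des_camions : (List (Int × Int)) := [(1, 2)]

def Spec_tri_des_camions (lignes : List (Int × Int)) (out : List (Int × Int)) : Prop := out = tri_des_camions_alt lignes
instance (lignes : List (Int × Int)) (out : List (Int × Int)) : Decidable (Spec_tri_des_camions lignes out) := by unfold Spec_tri_des_camions; infer_instance

-- ===== CLAIM (what is proved, stated in full; the proofs are below) =====
def Claim_equal_tri_des_camions : Prop := ∀ (lignes : List (Int × Int)), Dom_tri_des_camions lignes → Pre_tri_des_camions lignes → Spec_tri_des_camions lignes (tri_des_camions lignes)

-- ===== LEMMAS AND PROOFS =====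

-- min of the l.2 values of u, folded onto an Int seed (A side) / Option seed (B side)
def minI (m : Int) (u : List (Int × Int)) : Int := u.foldr (fun l x => min l.2 x) m

def minv (m : Option Int) (v : Int) : Option Int :=
  match m with
  | none => some v
  | some x => if v < x then some v else some x

def minO (m : Option Int) (u : List (Int × Int)) : Option Int := u.foldr (fun l x => minv x l.2) m

def keptRev (m : Int) : List (Int × Int) → List (Int × Int)
  | [] => []
  | l :: t => keptRev m t ++ (if l.2 ≤ minI m t then [l] else [])

def sufR (m : Option Int) : List (Int × Int) → List (Option Int)
  | [] => []
  | _ :: t => sufR m t ++ [minO m t]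

def keep : List (Int × Int) → List (Int × Int)
  | [] => []
  | l :: t =>
    if (match minO none t with | none => true | some v => decide (l.2 ≤ v)) then l :: keep t else keep t

theorem minv_some (x v : Int) : minv (some x) v = some (min v x) := by
  unfold minv
  rw [min_def]
  split_ifs <;> simp <;> omega

theorem foldA (u : List (Int × Int)) : ∀ (m : Int) (acc : List (Int × Int)),
    u.reverse.foldl
      (fun (st : Int × List (Int × Int)) l =>
        if l.2 ≤ st.1 then (l.2, st.2 ++ [l]) else st) (m, acc)
    = (minI m u, acc ++ keptRev m u) := by
  induction u with
  | nil => intro m acc; simp [minI, keptRev]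
  | cons l t ih =>
    intro m acc
    simp only [List.reverse_cons, List.foldl_append, ih, List.foldl_cons, List.foldl_nil]
    rw [show minI m (l :: t) = min l.2 (minI m t) from rfl,
        show keptRev m (l :: t) = keptRev m t ++ (if l.2 ≤ minI m t then [l] else []) from rfl]
    by_cases h : l.2 ≤ minI m t
    · rw [if_pos h, if_pos h, min_eq_left h]
      simp
    · rw [if_neg h, if_neg h, min_eq_right (le_of_not_ge h)]
      simp

theorem foldB (u : List (Int × Int)) : ∀ (m : Option Int) (acc : List (Option Int)),
    u.reverse.foldl
      (fun (st : Option Int × List (Option Int)) l =>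
        ((match st.1 with
          | none => some l.2
          | some v => if l.2 < v then some l.2 else st.1), st.2 ++ [st.1])) (m, acc)
    = (minO m u, acc ++ sufR m u) := by
  induction u with
  | nil => intro m acc; simp [minO, sufR]
  | cons l t ih =>
    intro m acc
    simp only [List.reverse_cons, List.foldl_append, ih, List.foldl_cons, List.foldl_nil]
    rw [show minO m (l :: t) = minv (minO m t) l.2 from rfl,
        show sufR m (l :: t) = sufR m t ++ [minO m t] from rfl]
    cases hm : minO m t <;> simp [minv]

theorem alt_eq_keep_aux (xs : List (Int × Int)) :
    (((xs.zip (sufR none xs).reverse).filter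
       (fun p => match p.2 with | none => true | some v => decide (p.1.2 ≤ v))).map Prod.fst)
    = keep xs := by
  induction xs with
  | nil => simp [sufR, keep]
  | cons l t ih =>
    simp only [sufR, List.reverse_append, List.reverse_cons, List.reverse_nil,
      List.nil_append, List.cons_append, List.zip_cons_cons, List.filter, keep]
    split
    · next h => simp_all [List.map]
    · next h => simp_all

theorem alt_eq_keep (xs : List (Int × Int)) : tri_des_camions_alt xs = keep xs := by
  unfold tri_des_camions_alt
  simp only [foldB, List.nil_append]
  exact alt_eq_keep_aux xs

theorem minO_last (t : List (Int × Int)) (h : t ≠ []) :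
    minO none t = some (minI ((t.getLast h).2) t) := by
  induction t with
  | nil => simp at h
  | cons l t ih =>
    cases t with
    | nil => simp [minO, minI, minv]
    | cons a t' =>
      have h' : a :: t' ≠ [] := by simp
      rw [List.getLast_cons h']
      have : minO none (l :: a :: t') = minv (minO none (a :: t')) l.2 := rfl
      rw [this, ih h', minv_some]
      simp [minI]

theorem keptRev_eq_keep (xs : List (Int × Int)) (h : xs ≠ []) :
    (keptRev ((xs.getLast h).2) xs).reverse = keep xs := by
  induction xs with
  | nil => simp at h
  | cons l t ih =>
    cases t with
    | nil =>
      simp [keptRev, keep, minI, minO, List.getLast]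
    | cons a t' =>
      have h' : a :: t' ≠ [] := by simp
      rw [List.getLast_cons h']
      rw [show keptRev (((a :: t').getLast h').2) (l :: a :: t')
            = keptRev (((a :: t').getLast h').2) (a :: t')
              ++ (if l.2 ≤ minI (((a :: t').getLast h').2) (a :: t') then [l] else []) from rfl]
      rw [List.reverse_append, ih h']
      rw [show keep (l :: a :: t')
            = (if (match minO none (a :: t') with | none => true | some v => decide (l.2 ≤ v))
               then l :: keep (a :: t') else keep (a :: t')) from rfl]
      rw [minO_last (a :: t') h']
      by_cases hc : l.2 ≤ minI (((a :: t').getLast h').2) (a :: t')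
      · simp [hc]
      · simp [hc]

theorem a_eq_keep (xs : List (Int × Int)) (h : xs ≠ []) : tri_des_camions xs = keep xs := by
  unfold tri_des_camions
  rw [PySem.List.pyGet?_neg_one, List.getLast?_eq_some_getLast h]
  simp only [foldA, List.nil_append]
  exact keptRev_eq_keep xs h

-- ===== VERDICT (by name: the statement is the Claim_ definition above) =====
theorem tri_des_camions_spec : Claim_equal_tri_des_camions := by
  intro lignes _ hpre
  unfold Spec_tri_des_camions
  rw [a_eq_keep lignes hpre, alt_eq_keep]
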